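-- pv_equiv track=rewrite | github.com/djankovik/NLP-Project | processData.py | get_disjunct_vocabularies
-- ===== SOURCE A (Python) =====
-- def get_disjunct_vocabularies(vocab_favor,vocab_against,vocab_none):
--     disj_favor = []
--     disj_against = []
--     disj_none = []
--     for word in vocab_favor:
--         if word not in vocab_against and word not in vocab_none:
--             disj_favor.append(word)
--     for word in vocab_against:
--         if word not in vocab_favor and word not in vocab_none:
--             disj_against.append(word)
--     for word in vocab_none:
--         if word not in vocab_against and word not in vocab_favor:
--             disj_none.append(word)
--     return (disj_favor,disj_against,disj_none)
-- ===== SOURCE B (Python) =====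
-- def get_disjunct_vocabularies(vocab_favor, vocab_against, vocab_none):
--     membership = {}
--     for label, vocab in (('f', vocab_favor), ('a', vocab_against), ('n', vocab_none)):
--         for w in vocab:
--             membership.setdefault(w, set()).add(label)
--     disj_favor = [w for w in vocab_favor if len(membership[w]) == 1]
--     disj_against = [w for w in vocab_against if len(membership[w]) == 1]
--     disj_none = [w for w in vocab_none if len(membership[w]) == 1]
--     return (disj_favor, disj_against, disj_none)
-- ===== Notes on version B (the rewrite author's own statement) =====
-- stated objective: faster
-- what changed: Replaces the three quadratic double-membership scans over the other two lists with one pass that builds a word->source-label-set dict, then filters each list by whether its words appear in exactly one source.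
import Mathlib
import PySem

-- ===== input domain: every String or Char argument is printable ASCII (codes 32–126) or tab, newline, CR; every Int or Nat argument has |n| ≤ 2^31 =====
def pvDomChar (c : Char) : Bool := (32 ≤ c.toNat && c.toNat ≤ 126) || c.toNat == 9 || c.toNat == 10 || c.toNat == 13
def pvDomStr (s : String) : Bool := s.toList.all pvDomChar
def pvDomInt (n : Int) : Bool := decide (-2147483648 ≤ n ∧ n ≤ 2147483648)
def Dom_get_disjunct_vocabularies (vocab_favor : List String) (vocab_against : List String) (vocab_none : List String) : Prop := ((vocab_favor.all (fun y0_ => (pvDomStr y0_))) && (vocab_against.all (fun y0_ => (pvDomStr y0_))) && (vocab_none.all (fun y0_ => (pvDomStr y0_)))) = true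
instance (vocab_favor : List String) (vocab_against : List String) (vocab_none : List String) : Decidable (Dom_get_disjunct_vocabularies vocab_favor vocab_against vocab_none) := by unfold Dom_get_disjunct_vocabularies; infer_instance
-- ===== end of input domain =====

-- B builds one word -> source-label-set dict in a single pass and filters each list by
-- "appears in exactly one source", instead of A's per-word scans of the other two lists (objective: faster).

-- ===== PORT A =====
def get_disjunct_vocabularies (vocab_favor : List String) (vocab_against : List String) (vocab_none : List String) : List String × List String × List String :=
  let disj_favor := vocab_favor.foldl (fun acc word =>
    if !(vocab_against.contains word) && !(vocab_none.contains word) then acc ++ [word] else acc) []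
  let disj_against := vocab_against.foldl (fun acc word =>
    if !(vocab_favor.contains word) && !(vocab_none.contains word) then acc ++ [word] else acc) []
  let disj_none := vocab_none.foldl (fun acc word =>
    if !(vocab_against.contains word) && !(vocab_favor.contains word) then acc ++ [word] else acc) []
  (disj_favor, disj_against, disj_none)

-- ===== PORT B =====
-- 'membership.setdefault(w, set()).add(label)' = store (getD w ∅).add label back at key w.
def pvAddLabels (d : PySem.Dict String (PySem.Set Char)) (label : Char) (vocab : List String) : PySem.Dict String (PySem.Set Char) :=
  vocab.foldl (fun d w => d.insert w (PySem.Set.add (d.getD w PySem.Set.empty) label)) d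

-- 'membership[w]' is ported as getD with the empty set: every filtered w is a key, so it never falls to the default.
def get_disjunct_vocabularies_alt (vocab_favor : List String) (vocab_against : List String) (vocab_none : List String) : List String × List String × List String :=
  let membership := pvAddLabels (pvAddLabels (pvAddLabels PySem.Dict.empty 'f' vocab_favor) 'a' vocab_against) 'n' vocab_none
  (vocab_favor.filter (fun w => (membership.getD w PySem.Set.empty).length == 1),
   vocab_against.filter (fun w => (membership.getD w PySem.Set.empty).length == 1),
   vocab_none.filter (fun w => (membership.getD w PySem.Set.empty).length == 1))

-- ===== PRECONDITION & SPEC =====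
def Spec_get_disjunct_vocabularies (vocab_favor : List String) (vocab_against : List String) (vocab_none : List String) (out : List String × List String × List String) : Prop := out = get_disjunct_vocabularies_alt vocab_favor vocab_against vocab_none
instance (vocab_favor : List String) (vocab_against : List String) (vocab_none : List String) (out : List String × List String × List String) : Decidable (Spec_get_disjunct_vocabularies vocab_favor vocab_against vocab_none out) := by unfold Spec_get_disjunct_vocabularies; infer_instance

-- ===== CLAIM (what is proved, stated in full; the proofs are below) =====
def Claim_equal_get_disjunct_vocabularies : Prop := ∀ (vocab_favor : List String) (vocab_against : List String) (vocab_none : List String), Dom_get_disjunct_vocabularies vocab_favor vocab_against vocab_none → Spec_get_disjunct_vocabularies vocab_favor vocab_against vocab_none (get_disjunct_vocabularies vocab_favor vocab_against vocab_none)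

-- ===== LEMMAS AND PROOFS =====

theorem mem_getD_pvAddLabels (d : PySem.Dict String (PySem.Set Char)) (lbl : Char) (vocab : List String) (w : String) (c : Char) :
    c ∈ (pvAddLabels d lbl vocab).getD w PySem.Set.empty ↔
      c ∈ d.getD w PySem.Set.empty ∨ (c = lbl ∧ w ∈ vocab) := by
  induction vocab generalizing d with
  | nil => simp [pvAddLabels]
  | cons x xs ih =>
    simp only [pvAddLabels, List.foldl_cons] at *
    rw [ih]
    rw [PySem.Dict.getD_insert]
    by_cases hw : w = x
    · subst hw
      simp [PySem.Set.mem_add]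
      tauto
    · simp [hw]

theorem nodup_getD_pvAddLabels (d : PySem.Dict String (PySem.Set Char)) (lbl : Char) (vocab : List String) (w : String)
    (h : (d.getD w PySem.Set.empty).Nodup) :
    ((pvAddLabels d lbl vocab).getD w PySem.Set.empty).Nodup := by
  induction vocab generalizing d with
  | nil => simpa [pvAddLabels] using h
  | cons x xs ih =>
    simp only [pvAddLabels, List.foldl_cons] at *
    apply ih
    rw [PySem.Dict.getD_insert]
    by_cases hw : w = x
    · subst hw
      simpa using PySem.Set.nodup_add _ lbl h
    · simpa [hw] using h

-- length-1 characterisation of a nodup label set containing x with labels among {x, y, z}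
theorem len_one_iff (s : List Char) (x y z : Char) (hxy : x ≠ y) (hxz : x ≠ z)
    (hnd : s.Nodup) (hx : x ∈ s) (hsub : ∀ c ∈ s, c = x ∨ c = y ∨ c = z) :
    s.length = 1 ↔ (y ∉ s ∧ z ∉ s) := by
  constructor
  · intro h1
    match s, h1 with
    | [a], _ =>
      simp only [List.mem_singleton] at hx ⊢
      subst hx
      exact ⟨fun h => hxy h.symm, fun h => hxz h.symm⟩
  · rintro ⟨hy, hz⟩
    have hall : ∀ c ∈ s, c = x := by
      intro c hc
      rcases hsub c hc with h | h | h
      · exact h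
      · exact absurd (h ▸ hc) hy
      · exact absurd (h ▸ hc) hz
    match s, hx with
    | a :: t, _ =>
      have ha : a = x := hall a (by simp)
      have ht : t = [] := by
        cases t with
        | nil => rfl
        | cons b t' =>
          have hb : b = x := hall b (by simp)
          simp [ha, hb] at hnd
      simp [ht]

theorem filter_component (this_v oth1 oth2 : List String)
    (lbl o1 o2 : Char) (hl1 : lbl ≠ o1) (hl2 : lbl ≠ o2) (h12 : o1 ≠ o2)
    (m : PySem.Dict String (PySem.Set Char))
    (hnd : ∀ w, (m.getD w PySem.Set.empty).Nodup)
    (hmem : ∀ c w, c ∈ m.getD w PySem.Set.empty ↔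
      (c = lbl ∧ w ∈ this_v) ∨ (c = o1 ∧ w ∈ oth1) ∨ (c = o2 ∧ w ∈ oth2)) :
    this_v.foldl (fun acc word => if !(oth1.contains word) && !(oth2.contains word) then acc ++ [word] else acc) []
      = this_v.filter (fun w => (m.getD w PySem.Set.empty).length == 1) := by
  rw [PySem.List.foldl_append_if_eq_filter]
  rw [List.nil_append]
  apply List.filter_congr
  intro w hw
  have hx : lbl ∈ m.getD w PySem.Set.empty := (hmem lbl w).mpr (Or.inl ⟨rfl, hw⟩)
  have hsub : ∀ c ∈ m.getD w PySem.Set.empty, c = lbl ∨ c = o1 ∨ c = o2 := by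
    intro c hc
    rcases (hmem c w).mp hc with ⟨h, _⟩ | ⟨h, _⟩ | ⟨h, _⟩ <;> tauto
  have key := len_one_iff (m.getD w PySem.Set.empty) lbl o1 o2 hl1 hl2 (hnd w) hx hsub
  have ho1 : o1 ∈ m.getD w PySem.Set.empty ↔ w ∈ oth1 := by
    rw [hmem]
    constructor
    · rintro (⟨h, _⟩ | ⟨_, h⟩ | ⟨h, _⟩)
      · exact absurd h.symm hl1
      · exact h
      · exact absurd h h12
    · intro h; exact Or.inr (Or.inl ⟨rfl, h⟩)
  have ho2 : o2 ∈ m.getD w PySem.Set.empty ↔ w ∈ oth2 := by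
    rw [hmem]
    constructor
    · rintro (⟨h, _⟩ | ⟨h, _⟩ | ⟨_, h⟩)
      · exact absurd h.symm hl2
      · exact absurd h.symm h12
      · exact h
    · intro h; exact Or.inr (Or.inr ⟨rfl, h⟩)
  rw [Bool.eq_iff_iff]
  simp only [Bool.and_eq_true, Bool.not_eq_true', beq_iff_eq,
    List.contains_eq_mem, decide_eq_false_iff_not, key, ho1, ho2]

-- ===== VERDICT (by name: the statement is the Claim_ definition above) =====
theorem get_disjunct_vocabularies_spec : Claim_equal_get_disjunct_vocabularies := by
  intro vf va vn _
  unfold Spec_get_disjunct_vocabularies get_disjunct_vocabularies get_disjunct_vocabularies_alt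
  set m := pvAddLabels (pvAddLabels (pvAddLabels PySem.Dict.empty 'f' vf) 'a' va) 'n' vn with hm
  have hnd : ∀ w, (m.getD w PySem.Set.empty).Nodup := by
    intro w
    apply nodup_getD_pvAddLabels
    apply nodup_getD_pvAddLabels
    apply nodup_getD_pvAddLabels
    simp [PySem.Dict.getD_empty, PySem.Set.empty]
  have hmem : ∀ c w, c ∈ m.getD w PySem.Set.empty ↔
      (c = 'f' ∧ w ∈ vf) ∨ (c = 'a' ∧ w ∈ va) ∨ (c = 'n' ∧ w ∈ vn) := by
    intro c w
    rw [hm, mem_getD_pvAddLabels, mem_getD_pvAddLabels, mem_getD_pvAddLabels]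
    simp [PySem.Dict.getD_empty, PySem.Set.empty]
    tauto
  refine Prod.ext ?_ (Prod.ext ?_ ?_) <;> simp only
  · exact filter_component vf va vn 'f' 'a' 'n' (by decide) (by decide) (by decide) m hnd hmem
  · exact filter_component va vf vn 'a' 'f' 'n' (by decide) (by decide) (by decide) m hnd
      (by intro c w; rw [hmem]; tauto)
  · exact filter_component vn va vf 'n' 'a' 'f' (by decide) (by decide) (by decide) m hnd
      (by intro c w; rw [hmem]; tauto)
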